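-- pv_equiv track=rewrite | github.com/iligu/Advent-of-Code | day12.py | get_rotations_and_flips
-- ===== SOURCE A (Python) =====
-- def get_rotations_and_flips(shape):
--     orientations = []
--     for flip in [False, True]:
--         current = shape.copy()
--         if flip and current:
--             max_c = max(c for r, c in current)
--             current = {(r, max_c - c) for r, c in current}
--         for _ in range(4):
--             if current:
--                 min_r = min(r for r, c in current)
--                 min_c = min(c for r, c in current)
--                 normalized = frozenset((r - min_r, c - min_c) for r, c in current)
--                 if normalized not in [frozenset(o) for o in orientations]:
--                     orientations.append(set(normalized))
--             current = {(c, -r) for r, c in current}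
--     return orientations
-- ===== SOURCE B (Python) =====
-- def get_rotations_and_flips(shape):
--     # Group-theoretic algorithm: compute the shape's symmetry subgroup inside the
--     # dihedral group D4 (transforms fixing the shape up to translation), then emit
--     # one orientation per left coset, taking the first transform of each coset in
--     # enumeration order.  No pairwise comparisons between produced orientations.
--     if not shape:
--         return []
--
--     def apply(t, cells):
--         k, f = t % 4, t // 4
--         out = []
--         for r, c in cells:
--             if f:
--                 c = -c
--             for _ in range(k):
--                 r, c = c, -r
--             out.append((r, c))
--         return out
--
--     def norm(cells):
--         mr = min(r for r, _ in cells)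
--         mc = min(c for _, c in cells)
--         return {(r - mr, c - mc) for r, c in cells}
--
--     base = norm(shape)
--     sym = [g for g in range(8) if norm(apply(g, shape)) == base]
--
--     def mul(t, g):
--         tk, tf = t % 4, t // 4
--         gk, gf = g % 4, g // 4
--         return (tk + (gk if tf == 0 else -gk)) % 4 + 4 * ((tf + gf) % 2)
--
--     orientations = []
--     covered = set()
--     for t in range(8):
--         if t not in covered:
--             orientations.append(norm(apply(t, shape)))
--             for g in sym:
--                 covered.add(mul(t, g))
--     return orientations
-- ===== Notes on version B (the rewrite author's own statement) =====
-- stated objective: alternative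
-- what changed: Replaces A's generate-and-dedup (8 orientations, each checked by rebuilding frozensets of all previously emitted ones) by a group-theoretic algorithm: compute the shape's symmetry subgroup of D4 (transforms fixing the shape up to translation), then emit exactly one orientation per left coset of that subgroup, marking cosets as covered via the D4 multiplication table; no comparisons between produced orientations.
import Mathlib
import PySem

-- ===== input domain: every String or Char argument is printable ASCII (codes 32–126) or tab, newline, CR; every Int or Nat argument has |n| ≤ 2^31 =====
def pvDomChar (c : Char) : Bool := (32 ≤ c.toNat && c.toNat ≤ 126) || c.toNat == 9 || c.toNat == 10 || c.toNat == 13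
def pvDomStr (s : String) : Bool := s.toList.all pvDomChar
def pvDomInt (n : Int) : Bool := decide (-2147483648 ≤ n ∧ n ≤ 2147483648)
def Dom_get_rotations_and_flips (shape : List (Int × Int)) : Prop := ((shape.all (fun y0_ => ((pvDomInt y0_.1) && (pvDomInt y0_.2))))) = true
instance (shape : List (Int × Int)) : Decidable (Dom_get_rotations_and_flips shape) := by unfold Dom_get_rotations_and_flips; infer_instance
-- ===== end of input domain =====

-- B replaces A's generate-and-dedup loop by a group-theoretic algorithm: it computes the
-- shape's symmetry subgroup of D4 and emits one orientation per left coset (objective: alternative).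


-- ===== PORT A =====
-- current = {(c, -r) for r, c in current}
def pvARot (current : List (Int × Int)) : PySem.Set (Int × Int) :=
  PySem.Set.ofList (current.map (fun p => (p.2, -p.1)))

-- body of the inner 'for _ in range(4)' loop, before the rotation: normalize current and
-- append it when unseen.  Python's 'frozenset' equality is set equality: ported by hand as
-- PySem.Set.equal on the Set values (exact); min over the nonempty current is minD (exact
-- under the 'if current' guard).
def pvAVisit (orientations : List (List (Int × Int))) (current : List (Int × Int)) :
    List (List (Int × Int)) :=
  if current ≠ [] then
    let min_r := PySem.List.minD (current.map (fun p => p.1)) (fun x => x) 0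
    let min_c := PySem.List.minD (current.map (fun p => p.2)) (fun x => x) 0
    let normalized : PySem.Set (Int × Int) :=
      PySem.Set.ofList (current.map (fun p => (p.1 - min_r, p.2 - min_c)))
    if (orientations.map (fun o => PySem.Set.ofList o)).any
        (fun f => PySem.Set.equal f normalized) then
      orientations
    else
      orientations ++ [(PySem.Set.ofList normalized : PySem.Set (Int × Int))]
  else orientations

def get_rotations_and_flips (shape : List (Int × Int)) : List (List (Int × Int)) :=
  [false, true].foldl (fun orientations flip =>
    let current := shape
    let current :=
      if flip && !current.isEmpty then
        let max_c := PySem.List.maxD (current.map (fun p => p.2)) (fun x => x) 0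
        (PySem.Set.ofList (current.map (fun p => (p.1, max_c - p.2))) : List (Int × Int))
      else current
    ((PySem.List.pyRange 0 4 1).foldl
      (fun st _ => (pvAVisit st.1 st.2, (pvARot st.2 : List (Int × Int))))
      (orientations, current)).1) []

-- ===== PORT B =====
-- apply(t, cells): per-cell body of the loop (mirror when t//4, then t%4 quarter turns),
-- the append-loop over cells is the map
def pvApplyCell (t : Int) (p : Int × Int) : Int × Int :=
  let k := PySem.Int.mod t 4
  let f := PySem.Int.floordiv t 4
  let c := if f ≠ 0 then -p.2 else p.2
  (PySem.List.pyRange 0 k 1).foldl (fun q _ => (q.2, -q.1)) (p.1, c)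

def pvApply (t : Int) (cells : List (Int × Int)) : List (Int × Int) :=
  cells.map (pvApplyCell t)

-- norm(cells): subtract the min row and min col, as a set (min over a nonempty list is minD)
def pvBNorm (cells : List (Int × Int)) : PySem.Set (Int × Int) :=
  let min_r := PySem.List.minD (cells.map (fun p => p.1)) (fun x => x) 0
  let min_c := PySem.List.minD (cells.map (fun p => p.2)) (fun x => x) 0
  PySem.Set.ofList (cells.map (fun p => (p.1 - min_r, p.2 - min_c)))

-- mul(t, g): composition table of D4 on the indices 0..7 (t = r^k ∘ m^f, k = t%4, f = t//4)
def pvMul (t g : Int) : Int :=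
  let tk := PySem.Int.mod t 4
  let tf := PySem.Int.floordiv t 4
  let gk := PySem.Int.mod g 4
  let gf := PySem.Int.floordiv g 4
  PySem.Int.mod (tk + (if tf = 0 then gk else -gk)) 4 + 4 * PySem.Int.mod (tf + gf) 2

def get_rotations_and_flips_alt (shape : List (Int × Int)) : List (List (Int × Int)) :=
  if shape = [] then []
  else
    let base := pvBNorm shape
    let sym := (PySem.List.pyRange 0 8 1).filter
      (fun g => PySem.Set.equal (pvBNorm (pvApply g shape)) base)
    ((PySem.List.pyRange 0 8 1).foldl
      (fun (st : List (List (Int × Int)) × PySem.Set Int) t =>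
        if st.2.contains t then st
        else (st.1 ++ [(pvBNorm (pvApply t shape) : List (Int × Int))],
              sym.foldl (fun cv g => PySem.Set.add cv (pvMul t g)) st.2))
      ([], PySem.Set.empty)).1

-- ===== PRECONDITION & SPEC =====
def Spec_get_rotations_and_flips (shape : List (Int × Int)) (out : List (List (Int × Int))) : Prop := out = get_rotations_and_flips_alt shape
instance (shape : List (Int × Int)) (out : List (List (Int × Int))) : Decidable (Spec_get_rotations_and_flips shape out) := by unfold Spec_get_rotations_and_flips; infer_instance

-- ===== CLAIM (what is proved, stated in full; the proofs are below) =====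
def Claim_equal_get_rotations_and_flips : Prop := ∀ (shape : List (Int × Int)), Dom_get_rotations_and_flips shape → Spec_get_rotations_and_flips shape (get_rotations_and_flips shape)

-- ===== LEMMAS AND PROOFS =====

-- the eight dihedral transforms as 2×2 integer matrices (a, b, c, d) : p ↦ (a r + b c, c r + d c)
def pvLin (M : Int × Int × Int × Int) (p : Int × Int) : Int × Int :=
  (M.1 * p.1 + M.2.1 * p.2, M.2.2.1 * p.1 + M.2.2.2 * p.2)

def pvMat (t : Int) : Int × Int × Int × Int :=
  if t = 0 then (1, 0, 0, 1)
  else if t = 1 then (0, 1, -1, 0)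
  else if t = 2 then (-1, 0, 0, -1)
  else if t = 3 then (0, -1, 1, 0)
  else if t = 4 then (1, 0, 0, -1)
  else if t = 5 then (0, -1, -1, 0)
  else if t = 6 then (-1, 0, 0, 1)
  else (0, 1, 1, 0)

def pvMatMul (M N : Int × Int × Int × Int) : Int × Int × Int × Int :=
  (M.1 * N.1 + M.2.1 * N.2.2.1, M.1 * N.2.1 + M.2.1 * N.2.2.2,
   M.2.2.1 * N.1 + M.2.2.2 * N.2.2.1, M.2.2.1 * N.2.1 + M.2.2.2 * N.2.2.2)

def pvInv (t : Int) : Int := if t = 1 then 3 else if t = 3 then 1 else t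

def pvT (t : Int) (p : Int × Int) : Int × Int := pvLin (pvMat t) p

-- the normalized candidate orientation of index t
def pvC (shape : List (Int × Int)) (t : Int) : List (Int × Int) :=
  pvBNorm (shape.map (pvT t))

-- one dedup-append step over already-normalized shapes
def pvStep (acc : List (List (Int × Int))) (s : List (Int × Int)) : List (List (Int × Int)) :=
  if acc.any (fun f => PySem.Set.equal f s) then acc else acc ++ [s]

def pvL8 : List Int := [0, 1, 2, 3, 4, 5, 6, 7]

-- "Y is a translate of X" (as sets of cells)
def pvTrRel (X Y : List (Int × Int)) : Prop :=
  ∃ v : Int × Int, ∀ p : Int × Int, p ∈ Y ↔ (p.1 + v.1, p.2 + v.2) ∈ X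

theorem pvLin_matmul (M N : Int × Int × Int × Int) (p : Int × Int) :
    pvLin M (pvLin N p) = pvLin (pvMatMul M N) p := by
  simp only [pvLin, pvMatMul]; exact Prod.ext (by ring) (by ring)

theorem pvLin_id (p : Int × Int) : pvLin (1, 0, 0, 1) p = p := by
  simp [pvLin]

theorem pv_matmul_inv_self : ∀ t ∈ pvL8, pvMatMul (pvMat (pvInv t)) (pvMat t) = (1, 0, 0, 1) := by
  decide

theorem pv_matmul_self_inv : ∀ t ∈ pvL8, pvMatMul (pvMat t) (pvMat (pvInv t)) = (1, 0, 0, 1) := by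
  decide

theorem pv_matmul_mul : ∀ t ∈ pvL8, ∀ g ∈ pvL8, pvMatMul (pvMat t) (pvMat g) = pvMat (pvMul t g) := by
  decide

theorem pv_mul_mem : ∀ t ∈ pvL8, ∀ g ∈ pvL8, pvMul t g ∈ pvL8 := by decide

theorem pv_inv_mem : ∀ t ∈ pvL8, pvInv t ∈ pvL8 := by decide

theorem pv_mul_inv_cancel : ∀ t ∈ pvL8, ∀ s ∈ pvL8, pvMul t (pvMul (pvInv t) s) = s := by decide

-- translations, rotations and their injectivity (A-side rewriting)
def pvTr (w : Int × Int) (p : Int × Int) : Int × Int := (p.1 + w.1, p.2 + w.2)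

theorem pvTr_inj (w : Int × Int) : Function.Injective (pvTr w) := by
  intro p q h
  simp only [pvTr, Prod.mk.injEq] at h
  exact Prod.ext (by omega) (by omega)

theorem pvRot_inj : Function.Injective (fun p : Int × Int => (p.2, -p.1)) := by
  intro p q h
  simp only [Prod.mk.injEq] at h
  exact Prod.ext (by omega) (by omega)

theorem pvSub_inj (a b : Int) : Function.Injective (fun p : Int × Int => (p.1 - a, p.2 - b)) := by
  intro p q h
  simp only [Prod.mk.injEq] at h
  exact Prod.ext (by omega) (by omega)

-- pvBNorm / pvAVisit with their 'let's inlined (definitional)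
theorem pvBNorm_def (c : List (Int × Int)) :
    pvBNorm c = PySem.Set.ofList (c.map (fun p =>
      (p.1 - PySem.List.minD (c.map (fun p => p.1)) (fun x => x) 0,
       p.2 - PySem.List.minD (c.map (fun p => p.2)) (fun x => x) 0))) := rfl

theorem pvAVisit_def (acc : List (List (Int × Int))) (c : List (Int × Int)) :
    pvAVisit acc c = if c ≠ [] then
      (if (acc.map (fun o => PySem.Set.ofList o)).any
          (fun f => PySem.Set.equal f (pvBNorm c)) then acc
       else acc ++ [(PySem.Set.ofList (pvBNorm c) : PySem.Set (Int × Int))])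
    else acc := rfl

theorem pv_ofList_map_inj {f : Int × Int → Int × Int} (hf : Function.Injective f)
    (l : List (Int × Int)) :
    PySem.Set.ofList (l.map f) = (PySem.Set.ofList l).map f := by
  induction l with
  | nil => rfl
  | cons x xs ih =>
      rw [List.map_cons, PySem.Set.ofList_cons, PySem.Set.ofList_cons, List.map_cons, ih]
      congr 1
      simp only [PySem.Set.discard, List.filter_map]
      congr 1
      apply List.filter_congr
      intro y _
      simp [Function.comp, hf.eq_iff]

theorem pv_ofList_map_ofList {f : Int × Int → Int × Int} (hf : Function.Injective f)
    (l : List (Int × Int)) :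
    PySem.Set.ofList ((PySem.Set.ofList l).map f) = PySem.Set.ofList (l.map f) := by
  rw [pv_ofList_map_inj hf l, pv_ofList_map_inj hf (PySem.Set.ofList l),
    PySem.Set.ofList_ofList]

theorem pv_ofList_ne_nil {l : List (Int × Int)} (h : l ≠ []) : PySem.Set.ofList l ≠ [] := by
  obtain ⟨x, hx⟩ := List.exists_mem_of_ne_nil l h
  exact List.ne_nil_of_mem ((PySem.Set.mem_ofList l x).mpr hx)

theorem pv_minD_char {l : List Int} (h : l ≠ []) :
    PySem.List.minD l (fun x => x) 0 ∈ l ∧ ∀ y ∈ l, PySem.List.minD l (fun x => x) 0 ≤ y := by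
  cases hm : PySem.List.min? l (fun x => x) with
  | none => exact absurd ((PySem.List.min?_eq_none_iff l _).mp hm) h
  | some m =>
      have : PySem.List.minD l (fun x => x) 0 = m := by
        simp [PySem.List.minD, hm]
      rw [this]
      exact ⟨PySem.List.min?_mem hm, PySem.List.min?_isMin hm⟩

theorem pv_minD_congr {l₁ l₂ : List Int} (h₁ : l₁ ≠ []) (h₂ : l₂ ≠ [])
    (hm : ∀ x, x ∈ l₁ ↔ x ∈ l₂) :
    PySem.List.minD l₁ (fun x => x) 0 = PySem.List.minD l₂ (fun x => x) 0 := by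
  obtain ⟨m1, hmin1⟩ := pv_minD_char h₁
  obtain ⟨m2, hmin2⟩ := pv_minD_char h₂
  exact le_antisymm (hmin1 _ ((hm _).mpr m2)) (hmin2 _ ((hm _).mp m1))

theorem pv_minD_map_add {l : List Int} (h : l ≠ []) (k : Int) :
    PySem.List.minD (l.map (· + k)) (fun x => x) 0 = PySem.List.minD l (fun x => x) 0 + k := by
  have h' : l.map (· + k) ≠ [] := by simp [h]
  obtain ⟨m1, hmin1⟩ := pv_minD_char h'
  obtain ⟨m2, hmin2⟩ := pv_minD_char h
  obtain ⟨x, hx, hxe⟩ := List.mem_map.mp m1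
  have h1 : PySem.List.minD l (fun x => x) 0 + k ≤ PySem.List.minD (l.map (· + k)) (fun x => x) 0 := by
    rw [← hxe]
    have := hmin2 x hx
    omega
  have h2 : PySem.List.minD (l.map (· + k)) (fun x => x) 0 ≤ PySem.List.minD l (fun x => x) 0 + k :=
    hmin1 _ (List.mem_map.mpr ⟨_, m2, rfl⟩)
  omega

theorem pv_bnorm_ofList {c : List (Int × Int)} (h : c ≠ []) :
    pvBNorm (PySem.Set.ofList c) = pvBNorm c := by
  have hfst : ∀ x, x ∈ (PySem.Set.ofList c).map Prod.fst ↔ x ∈ c.map Prod.fst := by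
    intro x
    simp only [List.mem_map]
    constructor
    · rintro ⟨p, hp, rfl⟩; exact ⟨p, (PySem.Set.mem_ofList c p).mp hp, rfl⟩
    · rintro ⟨p, hp, rfl⟩; exact ⟨p, (PySem.Set.mem_ofList c p).mpr hp, rfl⟩
  have hsnd : ∀ x, x ∈ (PySem.Set.ofList c).map Prod.snd ↔ x ∈ c.map Prod.snd := by
    intro x
    simp only [List.mem_map]
    constructor
    · rintro ⟨p, hp, rfl⟩; exact ⟨p, (PySem.Set.mem_ofList c p).mp hp, rfl⟩
    · rintro ⟨p, hp, rfl⟩; exact ⟨p, (PySem.Set.mem_ofList c p).mpr hp, rfl⟩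
  have h1 : (PySem.Set.ofList c).map Prod.fst ≠ [] := by
    simp [pv_ofList_ne_nil h]
  have h2 : c.map Prod.fst ≠ [] := by simp [h]
  have h3 : (PySem.Set.ofList c).map Prod.snd ≠ [] := by
    simp [pv_ofList_ne_nil h]
  have h4 : c.map Prod.snd ≠ [] := by simp [h]
  rw [pvBNorm_def, pvBNorm_def]
  rw [show (fun p : Int × Int => p.1) = Prod.fst from rfl,
      show (fun p : Int × Int => p.2) = Prod.snd from rfl]
  rw [pv_minD_congr h1 h2 hfst, pv_minD_congr h3 h4 hsnd]
  exact pv_ofList_map_ofList (pvSub_inj _ _) c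

theorem pv_bnorm_translate {c : List (Int × Int)} (h : c ≠ []) (w : Int × Int) :
    pvBNorm (c.map (pvTr w)) = pvBNorm c := by
  have hf : c.map Prod.fst ≠ [] := by simp [h]
  have hs : c.map Prod.snd ≠ [] := by simp [h]
  rw [pvBNorm_def, pvBNorm_def]
  rw [show (fun p : Int × Int => p.1) = Prod.fst from rfl,
      show (fun p : Int × Int => p.2) = Prod.snd from rfl]
  have e1 : (c.map (pvTr w)).map Prod.fst = (c.map Prod.fst).map (· + w.1) := by
    simp [pvTr, List.map_map, Function.comp]
  have e2 : (c.map (pvTr w)).map Prod.snd = (c.map Prod.snd).map (· + w.2) := by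
    simp [pvTr, List.map_map, Function.comp]
  rw [e1, e2, pv_minD_map_add hf w.1, pv_minD_map_add hs w.2]
  congr 1
  rw [List.map_map]
  apply List.map_congr_left
  intro p _
  apply Prod.ext <;> simp [pvTr]

-- A's candidate orientations, rewritten towards the transform form
theorem pv_candRot {shape : List (Int × Int)} (g t : (Int × Int) → (Int × Int))
    (hc : ∀ p, ((g p).2, -(g p).1) = t p) :
    pvARot (PySem.Set.ofList (shape.map g)) = PySem.Set.ofList (shape.map t) := by
  unfold pvARot
  rw [pv_ofList_map_ofList pvRot_inj, List.map_map]
  congr 1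
  exact List.map_congr_left (fun p _ => hc p)

theorem pv_candMirror {shape : List (Int × Int)} (f t : (Int × Int) → (Int × Int)) (w : Int × Int)
    (hc : ∀ p, f p = pvTr w (t p)) :
    PySem.Set.ofList (shape.map f) = (PySem.Set.ofList (shape.map t)).map (pvTr w) := by
  have : shape.map f = (shape.map t).map (pvTr w) := by
    rw [List.map_map]
    exact List.map_congr_left (fun p _ => hc p)
  rw [this, pv_ofList_map_inj (pvTr_inj w)]

theorem pv_candRotTr {shape : List (Int × Int)} (t t' : (Int × Int) → (Int × Int)) (w : Int × Int)
    (hc : ∀ p, ((t p).2, -(t p).1) = t' p) :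
    pvARot (((PySem.Set.ofList (shape.map t)) : List (Int × Int)).map (pvTr w))
      = (PySem.Set.ofList (shape.map t')).map (pvTr (w.2, -w.1)) := by
  unfold pvARot
  have e : (((PySem.Set.ofList (shape.map t)) : List (Int × Int)).map (pvTr w)).map
      (fun p : Int × Int => (p.2, -p.1))
      = (((PySem.Set.ofList (shape.map t)) : List (Int × Int)).map
          (fun p : Int × Int => (p.2, -p.1))).map (pvTr (w.2, -w.1)) := by
    simp only [List.map_map]
    apply List.map_congr_left
    intro p _
    apply Prod.ext <;> simp [pvTr] <;> omega
  rw [e, pv_ofList_map_inj (pvTr_inj _)]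
  congr 1
  exact pv_candRot t t' hc

theorem pv_ofList_pvBNorm (c : List (Int × Int)) :
    PySem.Set.ofList (pvBNorm c) = pvBNorm c := by
  rw [pvBNorm_def]
  exact PySem.Set.ofList_ofList _

theorem pvAVisit_eq {acc : List (List (Int × Int))} {c : List (Int × Int)} (hc : c ≠ [])
    (hg : ∀ o ∈ acc, PySem.Set.ofList o = o) :
    pvAVisit acc c = pvStep acc (pvBNorm c) := by
  rw [pvAVisit_def, if_pos hc, pv_ofList_pvBNorm]
  have hany : (acc.map (fun o => PySem.Set.ofList o)).any
      (fun f => PySem.Set.equal f (pvBNorm c)) = acc.any (fun f => PySem.Set.equal f (pvBNorm c)) := by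
    rw [List.any_map]
    exact PySem.List.any_congr_mem (fun o ho => by simp only [Function.comp]; rw [hg o ho])
  rw [hany]
  rfl

theorem pvStep_good {acc : List (List (Int × Int))} {c : List (Int × Int)}
    (hg : ∀ o ∈ acc, PySem.Set.ofList o = o) :
    ∀ o ∈ pvStep acc (pvBNorm c), PySem.Set.ofList o = o := by
  intro o ho
  unfold pvStep at ho
  split at ho
  · exact hg o ho
  · rcases List.mem_append.mp ho with h | h
    · exact hg o h
    · rw [List.mem_singleton.mp h]
      exact pv_ofList_pvBNorm c

-- the normalized candidate, as pvBNorm of the deduped transformed shape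
theorem pvC_spec {shape : List (Int × Int)} (hs : shape ≠ []) (i : Int)
    {lam : (Int × Int) → (Int × Int)} (h : ∀ p, pvT i p = lam p) :
    pvC shape i = pvBNorm (PySem.Set.ofList (shape.map lam)) := by
  rw [pvC, show shape.map (pvT i) = shape.map lam from List.map_congr_left (fun p _ => h p),
    pv_bnorm_ofList (by simp [hs])]

-- pvApplyCell computes the matrix transform, for t = 0..7
theorem pvApplyCell_eq : ∀ t ∈ pvL8, ∀ p : Int × Int, pvApplyCell t p = pvT t p := by
  intro t ht p
  fin_cases ht <;>
    simp [pvApplyCell, pvT, pvLin, pvMat,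
      show PySem.List.pyRange 0 1 1 = [0] from rfl,
      show PySem.List.pyRange 0 2 1 = [0, 1] from rfl,
      show PySem.List.pyRange 0 3 1 = [0, 1, 2] from rfl] <;> exact Prod.ext (by ring) (by ring)

theorem A_eq_chain {shape : List (Int × Int)} (hs : shape ≠ []) :
    get_rotations_and_flips shape = pvL8.foldl (fun acc t => pvStep acc (pvC shape t)) [] := by
  -- rewrite the chain's candidates pvC into A's explicit transform form
  have t0 : ∀ p : Int × Int, pvT 0 p = (fun p : Int × Int => (p.1, p.2)) p := by
    intro p; exact Prod.ext (by simp [pvT, pvMat, pvLin]) (by simp [pvT, pvMat, pvLin])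
  have t1 : ∀ p : Int × Int, pvT 1 p = (fun p : Int × Int => (p.2, -p.1)) p := by
    intro p; exact Prod.ext (by simp [pvT, pvMat, pvLin]) (by simp [pvT, pvMat, pvLin])
  have t2 : ∀ p : Int × Int, pvT 2 p = (fun p : Int × Int => (-p.1, -p.2)) p := by
    intro p; exact Prod.ext (by simp [pvT, pvMat, pvLin]) (by simp [pvT, pvMat, pvLin])
  have t3 : ∀ p : Int × Int, pvT 3 p = (fun p : Int × Int => (-p.2, p.1)) p := by
    intro p; exact Prod.ext (by simp [pvT, pvMat, pvLin]) (by simp [pvT, pvMat, pvLin])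
  have t4 : ∀ p : Int × Int, pvT 4 p = (fun p : Int × Int => (p.1, -p.2)) p := by
    intro p; exact Prod.ext (by simp [pvT, pvMat, pvLin]) (by simp [pvT, pvMat, pvLin])
  have t5 : ∀ p : Int × Int, pvT 5 p = (fun p : Int × Int => (-p.2, -p.1)) p := by
    intro p; exact Prod.ext (by simp [pvT, pvMat, pvLin]) (by simp [pvT, pvMat, pvLin])
  have t6 : ∀ p : Int × Int, pvT 6 p = (fun p : Int × Int => (-p.1, p.2)) p := by
    intro p; exact Prod.ext (by simp [pvT, pvMat, pvLin]) (by simp [pvT, pvMat, pvLin])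
  have t7 : ∀ p : Int × Int, pvT 7 p = (fun p : Int × Int => (p.2, p.1)) p := by
    intro p; exact Prod.ext (by simp [pvT, pvMat, pvLin]) (by simp [pvT, pvMat, pvLin])
  rw [show pvL8.foldl (fun acc t => pvStep acc (pvC shape t)) []
      = [pvC shape 0, pvC shape 1, pvC shape 2, pvC shape 3, pvC shape 4, pvC shape 5,
         pvC shape 6, pvC shape 7].foldl pvStep [] from rfl]
  rw [pvC_spec hs 0 t0, pvC_spec hs 1 t1, pvC_spec hs 2 t2, pvC_spec hs 3 t3,
      pvC_spec hs 4 t4, pvC_spec hs 5 t5, pvC_spec hs 6 t6, pvC_spec hs 7 t7]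
  -- A's side: collapse the two flip passes and four rotations into the pvStep chain
  have hR : PySem.List.pyRange 0 4 1 = [0, 1, 2, 3] := rfl
  have hE : shape.isEmpty = false := by simp [hs]
  simp only [get_rotations_and_flips, hR, List.foldl, hE, Bool.false_and, Bool.true_and,
    Bool.not_false, if_true, Bool.false_eq_true, if_false]
  set K := PySem.List.maxD (shape.map (fun p => p.2)) (fun x => x) 0 with hK
  have e1 : pvARot shape = PySem.Set.ofList (shape.map (fun p => (p.2, -p.1))) := rfl
  have e2 : pvARot (pvARot shape)
      = PySem.Set.ofList (shape.map (fun p => (-p.1, -p.2))) := by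
    rw [e1]
    exact pv_candRot _ _ (fun p => by apply Prod.ext <;> simp)
  have e3 : pvARot (pvARot (pvARot shape))
      = PySem.Set.ofList (shape.map (fun p => (-p.2, p.1))) := by
    rw [e2]
    exact pv_candRot _ _ (fun p => by apply Prod.ext <;> simp)
  have m0 : PySem.Set.ofList (shape.map (fun p => (p.1, K - p.2)))
      = (PySem.Set.ofList (shape.map (fun p => (p.1, -p.2)))).map (pvTr (0, K)) :=
    pv_candMirror _ _ _ (fun p => by apply Prod.ext <;> simp [pvTr] <;> omega)
  have m1 : pvARot ((PySem.Set.ofList (shape.map (fun p => (p.1, -p.2)))).map (pvTr (0, K)))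
      = (PySem.Set.ofList (shape.map (fun p => (-p.2, -p.1)))).map (pvTr (K, 0)) := by
    have := pv_candRotTr (shape := shape) (fun p => (p.1, -p.2)) (fun p => (-p.2, -p.1))
      (0, K) (fun p => by apply Prod.ext <;> simp)
    simpa using this
  have m2 : pvARot ((PySem.Set.ofList (shape.map (fun p => (-p.2, -p.1)))).map (pvTr (K, 0)))
      = (PySem.Set.ofList (shape.map (fun p => (-p.1, p.2)))).map (pvTr (0, -K)) := by
    have := pv_candRotTr (shape := shape) (fun p => (-p.2, -p.1)) (fun p => (-p.1, p.2))
      (K, 0) (fun p => by apply Prod.ext <;> simp)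
    simpa using this
  have m3 : pvARot ((PySem.Set.ofList (shape.map (fun p => (-p.1, p.2)))).map (pvTr (0, -K)))
      = (PySem.Set.ofList (shape.map (fun p => (p.2, p.1)))).map (pvTr (-K, 0)) := by
    have := pv_candRotTr (shape := shape) (fun p => (-p.1, p.2)) (fun p => (p.2, p.1))
      (0, -K) (fun p => by apply Prod.ext <;> simp)
    simpa using this
  rw [e3, e2, e1, m0, m1, m2, m3]
  have hne : ∀ t : (Int × Int) → (Int × Int),
      PySem.Set.ofList (shape.map t) ≠ [] :=
    fun t => pv_ofList_ne_nil (by simp [hs])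
  have hnem : ∀ (t : (Int × Int) → (Int × Int)) (w : Int × Int),
      ((PySem.Set.ofList (shape.map t)) : List (Int × Int)).map (pvTr w) ≠ [] := by
    intro t w
    simp [hne t]
  have g0 : ∀ o ∈ ([] : List (List (Int × Int))), PySem.Set.ofList o = o := by simp
  rw [pvAVisit_eq hs g0]
  rw [pvAVisit_eq (hne _) (pvStep_good g0)]
  rw [pvAVisit_eq (hne _) (pvStep_good (pvStep_good g0))]
  rw [pvAVisit_eq (hne _) (pvStep_good (pvStep_good (pvStep_good g0)))]
  rw [pvAVisit_eq (hnem _ _) (pvStep_good (pvStep_good (pvStep_good (pvStep_good g0))))]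
  rw [pvAVisit_eq (hnem _ _)
    (pvStep_good (pvStep_good (pvStep_good (pvStep_good (pvStep_good g0)))))]
  rw [pvAVisit_eq (hnem _ _)
    (pvStep_good (pvStep_good (pvStep_good (pvStep_good (pvStep_good (pvStep_good g0))))))]
  rw [pvAVisit_eq (hnem _ _)
    (pvStep_good (pvStep_good (pvStep_good (pvStep_good (pvStep_good (pvStep_good
      (pvStep_good g0)))))))]
  have f4 := pv_bnorm_translate (hne (fun p : Int × Int => (p.1, -p.2))) (0, K)
  have f5 := pv_bnorm_translate (hne (fun p : Int × Int => (-p.2, -p.1))) (K, 0)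
  have f6 := pv_bnorm_translate (hne (fun p : Int × Int => (-p.1, p.2))) (0, -K)
  have f7 := pv_bnorm_translate (hne (fun p : Int × Int => (p.2, p.1))) (-K, 0)
  have e0 : pvBNorm shape = pvBNorm (PySem.Set.ofList (shape.map (fun p => (p.1, p.2)))) := by
    have hid : shape.map (fun p : Int × Int => (p.1, p.2)) = shape := by simp
    rw [hid, pv_bnorm_ofList hs]
  rw [f4, f5, f6, f7, e0]

-- extra group facts on the index encoding
theorem pv_inv_mul_cancel : ∀ t ∈ pvL8, ∀ g ∈ pvL8, pvMul (pvInv t) (pvMul t g) = g := by decide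

-- min row / min col of a cell list
def pvMr (X : List (Int × Int)) : Int := PySem.List.minD (X.map (fun p => p.1)) (fun x => x) 0
def pvMc (X : List (Int × Int)) : Int := PySem.List.minD (X.map (fun p => p.2)) (fun x => x) 0

theorem pv_mem_bnorm (X : List (Int × Int)) (x : Int × Int) :
    x ∈ pvBNorm X ↔ ∃ q ∈ X, x = (q.1 - pvMr X, q.2 - pvMc X) := by
  rw [pvBNorm_def]
  rw [PySem.Set.mem_ofList]
  simp only [List.mem_map, pvMr, pvMc, eq_comm]

theorem pv_mr_spec {X : List (Int × Int)} (h : X ≠ []) :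
    (∃ q ∈ X, q.1 = pvMr X) ∧ ∀ q ∈ X, pvMr X ≤ q.1 := by
  obtain ⟨hm, hle⟩ := pv_minD_char (l := X.map (fun p => p.1)) (by simp [h])
  obtain ⟨q, hq, he⟩ := List.mem_map.mp hm
  exact ⟨⟨q, hq, he⟩, fun q hq => hle _ (List.mem_map.mpr ⟨q, hq, rfl⟩)⟩

theorem pv_mc_spec {X : List (Int × Int)} (h : X ≠ []) :
    (∃ q ∈ X, q.2 = pvMc X) ∧ ∀ q ∈ X, pvMc X ≤ q.2 := by
  obtain ⟨hm, hle⟩ := pv_minD_char (l := X.map (fun p => p.2)) (by simp [h])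
  obtain ⟨q, hq, he⟩ := List.mem_map.mp hm
  exact ⟨⟨q, hq, he⟩, fun q hq => hle _ (List.mem_map.mpr ⟨q, hq, rfl⟩)⟩

-- normalized shapes are set-equal exactly when the shapes are translates of each other
theorem pv_equal_norm_iff {X Y : List (Int × Int)} (hX : X ≠ []) (hY : Y ≠ []) :
    PySem.Set.equal (pvBNorm X) (pvBNorm Y) = true ↔ pvTrRel X Y := by
  rw [PySem.Set.equal_iff]
  constructor
  · intro hEq
    refine ⟨(pvMr X - pvMr Y, pvMc X - pvMc Y), fun p => ?_⟩
    constructor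
    · intro hp
      have hx : (p.1 - pvMr Y, p.2 - pvMc Y) ∈ pvBNorm Y :=
        (pv_mem_bnorm Y _).mpr ⟨p, hp, rfl⟩
      obtain ⟨q, hq, he⟩ := (pv_mem_bnorm X _).mp ((hEq _).mpr hx)
      have hq' : (p.1 + (pvMr X - pvMr Y), p.2 + (pvMc X - pvMc Y)) = q := by
        simp only [Prod.ext_iff] at he ⊢
        omega
      simpa [hq'] using hq
    · intro hp
      have hx : ((p.1 + (pvMr X - pvMr Y)) - pvMr X, (p.2 + (pvMc X - pvMc Y)) - pvMc X)
          ∈ pvBNorm X := (pv_mem_bnorm X _).mpr ⟨_, hp, rfl⟩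
      obtain ⟨q, hq, he⟩ := (pv_mem_bnorm Y _).mp ((hEq _).mp hx)
      have hq' : q = p := by
        simp only [Prod.ext_iff] at he ⊢
        omega
      rwa [hq'] at hq
  · rintro ⟨v, hv⟩
    obtain ⟨⟨qx, hqx, hqxe⟩, hxle⟩ := pv_mr_spec hX
    obtain ⟨⟨qy, hqy, hqye⟩, hyle⟩ := pv_mr_spec hY
    obtain ⟨⟨rx, hrx, hrxe⟩, hxle2⟩ := pv_mc_spec hX
    obtain ⟨⟨ry, hry, hrye⟩, hyle2⟩ := pv_mc_spec hY
    have hmr : pvMr Y = pvMr X - v.1 := by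
      have h1 : pvMr X ≤ qy.1 + v.1 := hxle _ ((hv qy).mp hqy)
      have hqx' : (qx.1 - v.1, qx.2 - v.2) ∈ Y := by
        apply (hv _).mpr
        have : (qx.1 - v.1 + v.1, qx.2 - v.2 + v.2) = qx := by
          simp only [Prod.ext_iff]; omega
        rw [this]; exact hqx
      have h2 : pvMr Y ≤ qx.1 - v.1 := hyle _ hqx'
      omega
    have hmc : pvMc Y = pvMc X - v.2 := by
      have h1 : pvMc X ≤ ry.2 + v.2 := hxle2 _ ((hv ry).mp hry)
      have hrx' : (rx.1 - v.1, rx.2 - v.2) ∈ Y := by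
        apply (hv _).mpr
        have : (rx.1 - v.1 + v.1, rx.2 - v.2 + v.2) = rx := by
          simp only [Prod.ext_iff]; omega
        rw [this]; exact hrx
      have h2 : pvMc Y ≤ rx.2 - v.2 := hyle2 _ hrx'
      omega
    intro x
    rw [pv_mem_bnorm, pv_mem_bnorm]
    constructor
    · rintro ⟨q, hq, rfl⟩
      refine ⟨(q.1 - v.1, q.2 - v.2), ?_, ?_⟩
      · apply (hv _).mpr
        have : (q.1 - v.1 + v.1, q.2 - v.2 + v.2) = q := by simp only [Prod.ext_iff]; omega
        rw [this]; exact hq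
      · simp only [Prod.ext_iff]; constructor <;> omega
    · rintro ⟨q, hq, rfl⟩
      refine ⟨(q.1 + v.1, q.2 + v.2), ?_, ?_⟩
      · apply (hv _).mp
        exact hq
      · simp only [Prod.ext_iff]; constructor <;> omega

theorem pvTrRel_symm {X Y : List (Int × Int)} : pvTrRel X Y → pvTrRel Y X := by
  rintro ⟨v, hv⟩
  refine ⟨(-v.1, -v.2), fun p => ?_⟩
  constructor
  · intro hp
    apply (hv _).mpr
    have : (p.1 + -v.1 + v.1, p.2 + -v.2 + v.2) = p := by simp only [Prod.ext_iff]; omega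
    rw [this]; exact hp
  · intro hp
    have := (hv _).mp hp
    have e : (p.1 + -v.1 + v.1, p.2 + -v.2 + v.2) = p := by simp only [Prod.ext_iff]; omega
    rwa [e] at this

theorem pvLin_add (M : Int × Int × Int × Int) (a b : Int × Int) :
    pvLin M (a.1 + b.1, a.2 + b.2)
      = ((pvLin M a).1 + (pvLin M b).1, (pvLin M a).2 + (pvLin M b).2) := by
  simp only [pvLin]; exact Prod.ext (by ring) (by ring)

-- a translate relation survives an invertible linear map of the plane
theorem pv_trrel_map {M N : Int × Int × Int × Int}
    (h1 : ∀ p, pvLin M (pvLin N p) = p) (h2 : ∀ p, pvLin N (pvLin M p) = p)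
    {X Y : List (Int × Int)} :
    pvTrRel X Y → pvTrRel (X.map (pvLin M)) (Y.map (pvLin M)) := by
  rintro ⟨v, hv⟩
  refine ⟨pvLin M v, fun q => ?_⟩
  constructor
  · intro hq
    obtain ⟨p, hp, rfl⟩ := List.mem_map.mp hq
    have hX : (p.1 + v.1, p.2 + v.2) ∈ X := (hv p).mp hp
    have e : pvLin M (p.1 + v.1, p.2 + v.2)
        = ((pvLin M p).1 + (pvLin M v).1, (pvLin M p).2 + (pvLin M v).2) := pvLin_add M p v
    rw [← e]
    exact List.mem_map.mpr ⟨_, hX, rfl⟩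
  · intro hq
    obtain ⟨z, hz, hze⟩ := List.mem_map.mp hq
    -- hze : pvLin M z = (q.1 + (pvLin M v).1, q.2 + (pvLin M v).2)
    have hzq : z = ((pvLin N q).1 + v.1, (pvLin N q).2 + v.2) := by
      have : pvLin N (pvLin M z)
          = pvLin N ((pvLin M (pvLin N q)).1 + (pvLin M v).1,
                     (pvLin M (pvLin N q)).2 + (pvLin M v).2) := by
        rw [hze, h1 q]
      rw [h2 z, ← pvLin_add M (pvLin N q) v, h2 _] at this
      exact this
    have hNq : pvLin N q ∈ Y := by
      apply (hv _).mpr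
      rw [← hzq]; exact hz
    have : pvLin M (pvLin N q) ∈ Y.map (pvLin M) := List.mem_map.mpr ⟨_, hNq, rfl⟩
    rwa [h1 q] at this

-- the candidate of index t equals the candidate of index s exactly when the index
-- (inv t) * s fixes the shape up to translation
theorem pv_eq_shift {shape : List (Int × Int)} (hs : shape ≠ []) {t s : Int}
    (ht : t ∈ pvL8) (hst : s ∈ pvL8) :
    (PySem.Set.equal (pvC shape t) (pvC shape s) = true ↔
     PySem.Set.equal (pvC shape (pvMul (pvInv t) s)) (pvBNorm shape) = true) := by
  have hmapne : ∀ i : Int, shape.map (pvT i) ≠ [] := fun i => by simp [hs]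
  have hC : ∀ i : Int, pvC shape i = pvBNorm (shape.map (pvT i)) := fun i => rfl
  rw [hC t, hC s, hC (pvMul (pvInv t) s),
    pv_equal_norm_iff (hmapne t) (hmapne s),
    pv_equal_norm_iff (hmapne _) hs]
  have h1 : ∀ p, pvLin (pvMat t) (pvLin (pvMat (pvInv t)) p) = p := fun p => by
    rw [pvLin_matmul, pv_matmul_self_inv t ht, pvLin_id]
  have h2 : ∀ p, pvLin (pvMat (pvInv t)) (pvLin (pvMat t) p) = p := fun p => by
    rw [pvLin_matmul, pv_matmul_inv_self t ht, pvLin_id]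
  have eA : (shape.map (pvT t)).map (pvLin (pvMat (pvInv t))) = shape := by
    rw [List.map_map]
    rw [show shape.map ((pvLin (pvMat (pvInv t))) ∘ pvT t) = shape.map (fun p => p) from
      List.map_congr_left (fun p _ => h2 p)]
    exact List.map_id _
  have eB : (shape.map (pvT s)).map (pvLin (pvMat (pvInv t)))
      = shape.map (pvT (pvMul (pvInv t) s)) := by
    rw [List.map_map]
    apply List.map_congr_left
    intro p _
    show pvLin (pvMat (pvInv t)) (pvLin (pvMat s) p) = pvT (pvMul (pvInv t) s) p
    rw [pvLin_matmul, pv_matmul_mul (pvInv t) (pv_inv_mem t ht) s hst]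
    rfl
  have eC : (shape.map (pvT (pvMul (pvInv t) s))).map (pvLin (pvMat t))
      = shape.map (pvT s) := by
    rw [List.map_map]
    apply List.map_congr_left
    intro p _
    show pvLin (pvMat t) (pvLin (pvMat (pvMul (pvInv t) s)) p) = pvT s p
    rw [pvLin_matmul,
      pv_matmul_mul t ht _ (pv_mul_mem _ (pv_inv_mem t ht) _ hst),
      pv_mul_inv_cancel t ht s hst]
    rfl
  constructor
  · intro h
    have := pv_trrel_map h2 h1 h
    rw [eA, eB] at this
    -- this : pvTrRel shape (shape.map (pvT (pvMul (pvInv t) s)))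
    exact pvTrRel_symm this
  · intro h
    have := pv_trrel_map h1 h2 (pvTrRel_symm h)
    -- : pvTrRel (shape.map (pvLin (pvMat t))) ((shape.map (pvT g')).map (pvLin (pvMat t)))
    rw [eC, show shape.map (pvLin (pvMat t)) = shape.map (pvT t) from rfl] at this
    exact this

-- the symmetry list computed by B
def pvSymL (shape : List (Int × Int)) : List Int :=
  pvL8.filter (fun g => PySem.Set.equal (pvC shape g) (pvBNorm shape))

-- coset characterisation: candidate t collides with candidate s iff s lies in t's left coset
theorem pv_coset {shape : List (Int × Int)} (hs : shape ≠ []) {t s : Int}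
    (ht : t ∈ pvL8) (hst : s ∈ pvL8) :
    (PySem.Set.equal (pvC shape t) (pvC shape s) = true ↔ s ∈ (pvSymL shape).map (pvMul t)) := by
  rw [pv_eq_shift hs ht hst]
  constructor
  · intro h
    exact List.mem_map.mpr ⟨pvMul (pvInv t) s,
      List.mem_filter.mpr ⟨pv_mul_mem _ (pv_inv_mem t ht) _ hst, h⟩,
      pv_mul_inv_cancel t ht s hst⟩
  · intro h
    obtain ⟨g, hg, he⟩ := List.mem_map.mp h
    obtain ⟨hgm, hgp⟩ := List.mem_filter.mp hg
    rw [← he, pv_inv_mul_cancel t ht g hgm]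
    exact hgp

-- the coupled fold: B's coset covering performs exactly A's dedup chain
theorem pv_couple {shape : List (Int × Int)} (hs : shape ≠ []) :
    ∀ (R : List Int), (∀ t ∈ R, t ∈ pvL8) →
    ∀ (acc : List (List (Int × Int))) (cov : PySem.Set Int),
    (∀ s ∈ pvL8, acc.any (fun f => PySem.Set.equal f (pvC shape s)) = cov.contains s) →
    (R.foldl (fun (st : List (List (Int × Int)) × PySem.Set Int) t =>
        if st.2.contains t then st
        else (st.1 ++ [pvC shape t],
              (pvSymL shape).foldl (fun cv g => PySem.Set.add cv (pvMul t g)) st.2))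
      (acc, cov)).1
    = R.foldl (fun a t => pvStep a (pvC shape t)) acc := by
  intro R
  induction R with
  | nil => intro _ acc cov _; rfl
  | cons t R ih =>
      intro hR acc cov hinv
      have ht : t ∈ pvL8 := hR t (List.mem_cons_self ..)
      have hR' : ∀ x ∈ R, x ∈ pvL8 := fun x hx => hR x (List.mem_cons_of_mem _ hx)
      simp only [List.foldl_cons]
      by_cases h : cov.contains t = true
      · rw [if_pos h, show pvStep acc (pvC shape t) = acc from by
          unfold pvStep; rw [hinv t ht, h]; simp]
        exact ih hR' acc cov hinv
      · have h' : cov.contains t = false := Bool.eq_false_iff.mpr h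
        rw [if_neg h, show pvStep acc (pvC shape t) = acc ++ [pvC shape t] from by
          unfold pvStep; rw [hinv t ht, h']; simp]
        apply ih hR'
        intro s hsm
        have hcovN : (pvSymL shape).foldl (fun cv g => PySem.Set.add cv (pvMul t g)) cov
            = PySem.Set.update cov (((pvSymL shape).map (pvMul t))) := by
          rw [show PySem.Set.update cov (((pvSymL shape).map (pvMul t)))
              = (((pvSymL shape).map (pvMul t))).foldl PySem.Set.add cov from rfl,
            List.foldl_map]
        rw [hcovN]
        have hL : (acc ++ [pvC shape t]).any (fun f => PySem.Set.equal f (pvC shape s))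
            = (acc.any (fun f => PySem.Set.equal f (pvC shape s))
               || PySem.Set.equal (pvC shape t) (pvC shape s)) := by
          simp [List.any_append]
        rw [hL, hinv s hsm]
        rcases hcov : cov.contains s with _ | _
        · rcases heq : PySem.Set.equal (pvC shape t) (pvC shape s) with _ | _
          · simp only [Bool.or_false]
            symm
            rw [Bool.eq_false_iff]
            intro hcon
            have hmem := (PySem.Set.contains_iff _ _).mp hcon
            rcases (PySem.Set.mem_update _ _ _).mp hmem with hin | hin
            · exact absurd ((PySem.Set.contains_iff _ _).mpr hin) (by rw [hcov]; exact fun hc => by cases hc)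
            · exact absurd ((pv_coset hs ht hsm).mpr hin) (by rw [heq]; exact fun hc => by cases hc)
          · simp only [Bool.or_true]
            symm
            apply (PySem.Set.contains_iff _ _).mpr
            exact (PySem.Set.mem_update _ _ _).mpr (Or.inr ((pv_coset hs ht hsm).mp heq))
        · simp only [Bool.true_or]
          symm
          apply (PySem.Set.contains_iff _ _).mpr
          exact (PySem.Set.mem_update _ _ _).mpr (Or.inl ((PySem.Set.contains_iff _ _).mp hcov))

theorem B_eq_chain {shape : List (Int × Int)} (hs : shape ≠ []) :
    get_rotations_and_flips_alt shape = pvL8.foldl (fun acc t => pvStep acc (pvC shape t)) [] := by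
  have hApp : ∀ g ∈ pvL8, pvBNorm (pvApply g shape) = pvC shape g := by
    intro g hg
    rw [pvApply, pvC,
      show shape.map (pvApplyCell g) = shape.map (pvT g) from
        List.map_congr_left (fun p _ => pvApplyCell_eq g hg p)]
  have e : get_rotations_and_flips_alt shape
      = ((pvL8.foldl
          (fun (st : List (List (Int × Int)) × PySem.Set Int) t =>
            if st.2.contains t then st
            else (st.1 ++ [(pvBNorm (pvApply t shape) : List (Int × Int))],
                  (pvL8.filter
                    (fun g => PySem.Set.equal (pvBNorm (pvApply g shape)) (pvBNorm shape))).foldl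
                    (fun cv g => PySem.Set.add cv (pvMul t g)) st.2))
          ([], PySem.Set.empty)).1) := by
    simp only [get_rotations_and_flips_alt, if_neg hs]
    rfl
  rw [e,
    show pvL8.filter (fun g => PySem.Set.equal (pvBNorm (pvApply g shape)) (pvBNorm shape))
        = pvSymL shape from List.filter_congr (fun g hg => by rw [hApp g hg]),
    PySem.List.foldl_congr_mem pvL8 _
      (fun (st : List (List (Int × Int)) × PySem.Set Int) t =>
        if st.2.contains t then st
        else (st.1 ++ [pvC shape t],
              (pvSymL shape).foldl (fun cv g => PySem.Set.add cv (pvMul t g)) st.2))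
      ([], PySem.Set.empty)
      (fun st t htm => by rw [hApp t htm])]
  exact pv_couple hs pvL8 (fun t ht => ht) [] PySem.Set.empty (fun s _ => rfl)

-- ===== VERDICT (by name: the statement is the Claim_ definition above) =====
theorem get_rotations_and_flips_spec : Claim_equal_get_rotations_and_flips := by
  intro shape _
  unfold Spec_get_rotations_and_flips
  by_cases hs : shape = []
  · subst hs; rfl
  · rw [A_eq_chain hs, B_eq_chain hs]
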